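-- pv_equiv track=rewrite | github.com/yakira666/New_live | oop/Sergei_Balakirev_course/Class_static_method/task_3.py | check_card_number
-- ===== SOURCE A (Python) =====
-- def check_card_number(number):
--     elems = number.split("-")
--     if len(elems) == 4:
--         for i in elems:
--             if len(i) == 4 and i.isdigit():
--                 continue
--             else:
--                 return False
--         return True
--     return False
-- ===== SOURCE B (Python) =====
-- def check_card_number(number):
--     if len(number) != 19:
--         return False
--     if number[4] != "-" or number[9] != "-" or number[14] != "-":
--         return False
--     return all(number[a:a + 4].isdigit() for a in (0, 5, 10, 15))
-- ===== Notes on version B (the rewrite author's own statement) =====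
-- stated objective: alternative
-- what changed: Replaces split-on-dash plus a loop over the pieces with a fixed-position check: length 19, dashes at indices 4/9/14, and the four fixed digit slices.
import Mathlib
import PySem

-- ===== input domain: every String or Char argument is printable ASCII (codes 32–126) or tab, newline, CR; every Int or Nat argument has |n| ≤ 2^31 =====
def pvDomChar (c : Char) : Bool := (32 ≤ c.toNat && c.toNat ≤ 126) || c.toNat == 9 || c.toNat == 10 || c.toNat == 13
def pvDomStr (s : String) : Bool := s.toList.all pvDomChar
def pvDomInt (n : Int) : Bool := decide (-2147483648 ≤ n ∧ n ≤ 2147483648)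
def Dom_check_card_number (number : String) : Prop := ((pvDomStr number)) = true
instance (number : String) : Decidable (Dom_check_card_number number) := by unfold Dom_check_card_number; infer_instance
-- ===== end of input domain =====

-- B replaces split-on-dash-and-loop with a fixed-position validator (length 19, dashes at 4/9/14, four fixed digit slices); alternative decomposition, same behaviour.


-- ===== PORT A =====
-- the 'for i in elems: … return False / return True' loop of A
def pvCheckGroups : List (List Char) → Bool
  | [] => true
  | i :: rest => if i.length == 4 && PySem.Chars.strIsdigit i then pvCheckGroups rest else false

def check_card_number (number : String) : Bool :=
  let elems := PySem.Chars.splitOn number.toList ['-']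
  if elems.length == 4 then pvCheckGroups elems
  else false

-- ===== PORT B =====
def check_card_number_alt (number : String) : Bool :=
  let cs := number.toList
  if PySem.Chars.len cs != 19 then false
  else if PySem.Chars.pyGet? cs 4 != some '-' || PySem.Chars.pyGet? cs 9 != some '-'
          || PySem.Chars.pyGet? cs 14 != some '-' then false
  else [(0 : Int), 5, 10, 15].all
         (fun a => PySem.Chars.strIsdigit (PySem.Chars.slice cs (some a) (some (a + 4))))

-- ===== PRECONDITION & SPEC =====
def Spec_check_card_number (number : String) (out : Bool) : Prop := out = check_card_number_alt number
instance (number : String) (out : Bool) : Decidable (Spec_check_card_number number out) := by unfold Spec_check_card_number; infer_instance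

-- ===== CLAIM (what is proved, stated in full; the proofs are below) =====
def Claim_equal_check_card_number : Prop := ∀ (number : String), Dom_check_card_number number → Spec_check_card_number number (check_card_number number)

-- ===== LEMMAS AND PROOFS =====

-- structural model of number.split("-")
def pvSplit : List Char → List (List Char)
  | [] => [[]]
  | c :: rest => if c = '-' then [] :: pvSplit rest else (pvSplit rest).modifyHead (c :: ·)

theorem pvSplit_ne_nil (cs : List Char) : pvSplit cs ≠ [] := by
  induction cs with
  | nil => simp [pvSplit]
  | cons c rest ih =>
    simp only [pvSplit]
    split_ifs
    · simp
    · cases h : pvSplit rest with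
      | nil => exact absurd h ih
      | cons e es => simp

theorem pvSplitOn_go_eq (l : List Char) : ∀ (fuel : Nat) (cur : List Char) (acc : List (List Char)),
    l.length ≤ fuel →
    PySem.Chars.splitOn.go ['-'] fuel l cur acc
      = acc.reverse ++ (pvSplit l).modifyHead (cur.reverse ++ ·) := by
  induction l with
  | nil =>
    intro fuel cur acc _
    cases fuel <;> simp [PySem.Chars.splitOn.go, pvSplit]
  | cons c rest ih =>
    intro fuel cur acc hf
    cases fuel with
    | zero => simp at hf
    | succ f =>
      simp only [PySem.Chars.splitOn.go]
      by_cases hc : c = '-'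
      · subst hc
        rw [if_pos (by simp [List.isPrefixOf])]
        rw [show List.drop ['-'].length ('-' :: rest) = rest from rfl]
        rw [ih f [] (cur.reverse :: acc) (by simpa using Nat.lt_succ_iff.mp (by simpa using hf))]
        cases h : pvSplit rest with
        | nil => exact absurd h (pvSplit_ne_nil rest)
        | cons e es => simp [pvSplit, h]
      · rw [if_neg (by simp [List.isPrefixOf]; intro h; exact hc h.symm)]
        rw [ih f (c :: cur) acc (by simpa using Nat.lt_succ_iff.mp (by simpa using hf))]
        cases h : pvSplit rest with
        | nil => exact absurd h (pvSplit_ne_nil rest)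
        | cons e es => simp [pvSplit, hc, h]

theorem pvSplitOn_eq (cs : List Char) : PySem.Chars.splitOn cs ['-'] = pvSplit cs := by
  have h := pvSplitOn_go_eq cs (cs.length + 1) [] [] (Nat.le_succ _)
  unfold PySem.Chars.splitOn
  rw [h]
  cases hs : pvSplit cs with
  | nil => exact absurd hs (pvSplit_ne_nil cs)
  | cons e es => simp

-- joining the split pieces back with '-'
def pvJoin : List (List Char) → List Char
  | [] => []
  | [e] => e
  | e :: es => e ++ '-' :: pvJoin es

theorem pvJoin_cons_cons (c : Char) (e : List Char) (es : List (List Char)) :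
    pvJoin ((c :: e) :: es) = c :: pvJoin (e :: es) := by
  cases es <;> simp [pvJoin]

theorem pvJoin_pvSplit (cs : List Char) : pvJoin (pvSplit cs) = cs := by
  induction cs with
  | nil => simp [pvSplit, pvJoin]
  | cons c rest ih =>
    simp only [pvSplit]
    split_ifs with hc
    · subst hc
      cases h : pvSplit rest with
      | nil => exact absurd h (pvSplit_ne_nil rest)
      | cons e es => rw [h] at ih; simp [pvJoin, ih]
    · cases h : pvSplit rest with
      | nil => exact absurd h (pvSplit_ne_nil rest)
      | cons e es => rw [h] at ih; simp [pvJoin_cons_cons, ih]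

theorem pvSplit_no_dash (g : List Char) (h : '-' ∉ g) : pvSplit g = [g] := by
  induction g with
  | nil => simp [pvSplit]
  | cons c rest ih =>
    simp only [List.mem_cons, not_or] at h
    simp [pvSplit, Ne.symm, h.1, ih h.2]

theorem pvSplit_append (g rest : List Char) (h : '-' ∉ g) :
    pvSplit (g ++ '-' :: rest) = g :: pvSplit rest := by
  induction g with
  | nil => simp [pvSplit]
  | cons c gtl ih =>
    simp only [List.mem_cons, not_or] at h
    simp [pvSplit, Ne.symm, h.1, ih h.2]

theorem pvNoDash_of_digits (g : List Char) (h : PySem.Chars.strIsdigit g = true) : '-' ∉ g := by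
  intro hm
  simp only [PySem.Chars.strIsdigit, Bool.and_eq_true, List.all_eq_true] at h
  exact absurd (h.2 '-' hm) (by decide)

-- the shared decomposition: "cs is four 4-digit groups joined by dashes"
def pvShape (cs : List Char) : Prop :=
  ∃ e1 e2 e3 e4 : List Char,
    e1.length = 4 ∧ e2.length = 4 ∧ e3.length = 4 ∧ e4.length = 4 ∧
    PySem.Chars.strIsdigit e1 = true ∧ PySem.Chars.strIsdigit e2 = true ∧
    PySem.Chars.strIsdigit e3 = true ∧ PySem.Chars.strIsdigit e4 = true ∧
    cs = e1 ++ '-' :: (e2 ++ '-' :: (e3 ++ '-' :: e4))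

theorem pvLen4 {α : Type} (l : List α) (h : l.length = 4) : ∃ a b c d, l = [a, b, c, d] := by
  rcases l with _ | ⟨a, _ | ⟨b, _ | ⟨c, _ | ⟨d, _ | ⟨e, t⟩⟩⟩⟩⟩
  · simp at h
  · simp at h
  · simp at h
  · simp at h
  · exact ⟨a, b, c, d, rfl⟩
  · simp only [List.length_cons] at h; omega

theorem pvCheckGroups_four (e1 e2 e3 e4 : List Char) :
    pvCheckGroups [e1, e2, e3, e4] = true ↔
      (e1.length = 4 ∧ PySem.Chars.strIsdigit e1 = true) ∧
      (e2.length = 4 ∧ PySem.Chars.strIsdigit e2 = true) ∧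
      (e3.length = 4 ∧ PySem.Chars.strIsdigit e3 = true) ∧
      (e4.length = 4 ∧ PySem.Chars.strIsdigit e4 = true) := by
  by_cases c1 : (e1.length == 4 && PySem.Chars.strIsdigit e1) = true <;>
    by_cases c2 : (e2.length == 4 && PySem.Chars.strIsdigit e2) = true <;>
      by_cases c3 : (e3.length == 4 && PySem.Chars.strIsdigit e3) = true <;>
        by_cases c4 : (e4.length == 4 && PySem.Chars.strIsdigit e4) = true <;>
          simp_all [pvCheckGroups]

theorem pvLHS_iff (cs : List Char) :
    (if (pvSplit cs).length == 4 then pvCheckGroups (pvSplit cs) else false) = true ↔ pvShape cs := by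
  constructor
  · intro h
    by_cases hl : (pvSplit cs).length = 4
    · rw [if_pos (by simpa using hl)] at h
      obtain ⟨e1, e2, e3, e4, hS⟩ := pvLen4 _ hl
      rw [hS] at h
      obtain ⟨⟨l1, d1⟩, ⟨l2, d2⟩, ⟨l3, d3⟩, l4, d4⟩ := (pvCheckGroups_four e1 e2 e3 e4).mp h
      have hj := pvJoin_pvSplit cs
      rw [hS] at hj
      exact ⟨e1, e2, e3, e4, l1, l2, l3, l4, d1, d2, d3, d4, by simpa [pvJoin] using hj.symm⟩
    · rw [if_neg (by simpa using hl)] at h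
      exact absurd h (by simp)
  · rintro ⟨e1, e2, e3, e4, l1, l2, l3, l4, d1, d2, d3, d4, rfl⟩
    rw [pvSplit_append _ _ (pvNoDash_of_digits _ d1), pvSplit_append _ _ (pvNoDash_of_digits _ d2),
        pvSplit_append _ _ (pvNoDash_of_digits _ d3), pvSplit_no_dash _ (pvNoDash_of_digits _ d4)]
    rw [if_pos (by simp)]
    exact (pvCheckGroups_four e1 e2 e3 e4).mpr ⟨⟨l1, d1⟩, ⟨l2, d2⟩, ⟨l3, d3⟩, l4, d4⟩

theorem pvSlice04 (cs : List Char) : PySem.List.slice cs none (some (4 : Int)) = cs.take 4 := by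
  simp [PySem.List.slice]

theorem pvSlice59 (cs : List Char) : PySem.List.slice cs (some (5 : Int)) (some 9) = (cs.drop 5).take 4 := by
  rw [PySem.List.slice_toNat cs (by norm_num) (by norm_num)]; simp

theorem pvSlice1014 (cs : List Char) : PySem.List.slice cs (some (10 : Int)) (some 14) = (cs.drop 10).take 4 := by
  rw [PySem.List.slice_toNat cs (by norm_num) (by norm_num)]; simp

theorem pvSlice1519 (cs : List Char) : PySem.List.slice cs (some (15 : Int)) (some 19) = (cs.drop 15).take 4 := by
  rw [PySem.List.slice_toNat cs (by norm_num) (by norm_num)]; simp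

theorem pvRHS_iff (cs : List Char) :
    (if PySem.Chars.len cs != 19 then false
     else if PySem.Chars.pyGet? cs 4 != some '-' || PySem.Chars.pyGet? cs 9 != some '-'
             || PySem.Chars.pyGet? cs 14 != some '-' then false
     else [(0 : Int), 5, 10, 15].all
            (fun a => PySem.Chars.strIsdigit (PySem.Chars.slice cs (some a) (some (a + 4))))) = true
      ↔ pvShape cs := by
  constructor
  · intro h
    by_cases hA : (PySem.Chars.len cs != 19) = true
    · rw [if_pos hA] at h; exact absurd h (by simp)
    rw [if_neg hA] at h
    by_cases hB : (PySem.Chars.pyGet? cs 4 != some '-' || PySem.Chars.pyGet? cs 9 != some '-'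
                     || PySem.Chars.pyGet? cs 14 != some '-') = true
    · rw [if_pos hB] at h; exact absurd h (by simp)
    rw [if_neg hB] at h
    have hlen : cs.length = 19 := by
      have h' := hA; simp at h'; exact_mod_cast h'
    have hg : cs[4]? = some '-' ∧ cs[9]? = some '-' ∧ cs[14]? = some '-' := by
      simpa [PySem.List.pyGet?_ofNat', and_assoc] using hB
    obtain ⟨hg4, hg9, hg14⟩ := hg
    simp only [List.all_cons, List.all_nil, Bool.and_eq_true, and_true] at h
    norm_num at h
    rw [pvSlice04, pvSlice59, pvSlice1014, pvSlice1519] at h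
    obtain ⟨d1, d2, d3, d4⟩ := h
    have e4t : (cs.drop 15).take 4 = cs.drop 15 := List.take_of_length_le (by simp [hlen])
    rw [e4t] at d4
    have l4 : 4 < cs.length := by omega
    have l9 : 9 < cs.length := by omega
    have l14 : 14 < cs.length := by omega
    have e4c : cs[4] = '-' := by rw [List.getElem?_eq_getElem l4] at hg4; exact Option.some.inj hg4
    have e9c : cs[9] = '-' := by rw [List.getElem?_eq_getElem l9] at hg9; exact Option.some.inj hg9
    have e14c : cs[14] = '-' := by rw [List.getElem?_eq_getElem l14] at hg14; exact Option.some.inj hg14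
    have t4 : cs.drop 4 = '-' :: cs.drop 5 := by
      rw [List.drop_eq_getElem_cons l4, e4c]
    have t9 : cs.drop 9 = '-' :: cs.drop 10 := by
      rw [List.drop_eq_getElem_cons l9, e9c]
    have t14 : cs.drop 14 = '-' :: cs.drop 15 := by
      rw [List.drop_eq_getElem_cons l14, e14c]
    have s5 : cs.drop 5 = (cs.drop 5).take 4 ++ cs.drop 9 := by
      have hd : (cs.drop 5).drop 4 = cs.drop 9 := by rw [List.drop_drop]
      conv_lhs => rw [← List.take_append_drop 4 (cs.drop 5)]
      rw [hd]
    have s10 : cs.drop 10 = (cs.drop 10).take 4 ++ cs.drop 14 := by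
      have hd : (cs.drop 10).drop 4 = cs.drop 14 := by rw [List.drop_drop]
      conv_lhs => rw [← List.take_append_drop 4 (cs.drop 10)]
      rw [hd]
    refine ⟨cs.take 4, (cs.drop 5).take 4, (cs.drop 10).take 4, cs.drop 15,
            ?_, ?_, ?_, ?_, d1, d2, d3, d4, ?_⟩
    · simp [hlen]
    · simp [hlen]
    · simp [hlen]
    · simp [hlen]
    · calc cs = cs.take 4 ++ cs.drop 4 := (List.take_append_drop 4 cs).symm
        _ = cs.take 4 ++ '-' :: cs.drop 5 := by rw [t4]
        _ = cs.take 4 ++ '-' :: ((cs.drop 5).take 4 ++ cs.drop 9) := by conv_lhs => rw [s5]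
        _ = cs.take 4 ++ '-' :: ((cs.drop 5).take 4 ++ '-' :: cs.drop 10) := by rw [t9]
        _ = cs.take 4 ++ '-' :: ((cs.drop 5).take 4 ++ '-' :: ((cs.drop 10).take 4 ++ cs.drop 14)) := by
              conv_lhs => rw [s10]
        _ = cs.take 4 ++ '-' :: ((cs.drop 5).take 4 ++ '-' :: ((cs.drop 10).take 4 ++ '-' :: cs.drop 15)) := by
              rw [t14]
  · rintro ⟨e1, e2, e3, e4, l1, l2, l3, l4, d1, d2, d3, d4, rfl⟩
    have hlen : (e1 ++ '-' :: (e2 ++ '-' :: (e3 ++ '-' :: e4))).length = 19 := by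
      simp [l1, l2, l3, l4]
    have d5 : (e1 ++ '-' :: (e2 ++ '-' :: (e3 ++ '-' :: e4))).drop 5
        = e2 ++ '-' :: (e3 ++ '-' :: e4) := by
      have h : (e1 ++ ['-']).length = 5 := by simp [l1]
      calc (e1 ++ '-' :: (e2 ++ '-' :: (e3 ++ '-' :: e4))).drop 5
          = ((e1 ++ ['-']) ++ (e2 ++ '-' :: (e3 ++ '-' :: e4))).drop 5 := by simp
        _ = e2 ++ '-' :: (e3 ++ '-' :: e4) := List.drop_left' h
    have d10 : (e1 ++ '-' :: (e2 ++ '-' :: (e3 ++ '-' :: e4))).drop 10 = e3 ++ '-' :: e4 := by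
      have h1 : ((e1 ++ '-' :: (e2 ++ '-' :: (e3 ++ '-' :: e4))).drop 5).drop 5
          = (e1 ++ '-' :: (e2 ++ '-' :: (e3 ++ '-' :: e4))).drop 10 := by rw [List.drop_drop]
      rw [← h1, d5]
      have h : (e2 ++ ['-']).length = 5 := by simp [l2]
      calc (e2 ++ '-' :: (e3 ++ '-' :: e4)).drop 5
          = ((e2 ++ ['-']) ++ (e3 ++ '-' :: e4)).drop 5 := by simp
        _ = e3 ++ '-' :: e4 := List.drop_left' h
    have d15 : (e1 ++ '-' :: (e2 ++ '-' :: (e3 ++ '-' :: e4))).drop 15 = e4 := by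
      have h1 : ((e1 ++ '-' :: (e2 ++ '-' :: (e3 ++ '-' :: e4))).drop 10).drop 5
          = (e1 ++ '-' :: (e2 ++ '-' :: (e3 ++ '-' :: e4))).drop 15 := by rw [List.drop_drop]
      rw [← h1, d10]
      have h : (e3 ++ ['-']).length = 5 := by simp [l3]
      calc (e3 ++ '-' :: e4).drop 5 = ((e3 ++ ['-']) ++ e4).drop 5 := by simp
        _ = e4 := List.drop_left' h
    have g4 : (e1 ++ '-' :: (e2 ++ '-' :: (e3 ++ '-' :: e4)))[4]? = some '-' := by
      rw [List.getElem?_append_right (by omega)]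
      simp [l1]
    have g9 : (e1 ++ '-' :: (e2 ++ '-' :: (e3 ++ '-' :: e4)))[9]? = some '-' := by
      rw [show (9 : Nat) = 5 + 4 from rfl, ← List.getElem?_drop, d5,
          List.getElem?_append_right (by omega)]
      simp [l2]
    have g14 : (e1 ++ '-' :: (e2 ++ '-' :: (e3 ++ '-' :: e4)))[14]? = some '-' := by
      rw [show (14 : Nat) = 10 + 4 from rfl, ← List.getElem?_drop, d10,
          List.getElem?_append_right (by omega)]
      simp [l3]
    rw [if_neg (by simp [hlen]), if_neg (by simp [PySem.List.pyGet?_ofNat', g4, g9, g14])]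
    simp only [List.all_cons, List.all_nil, Bool.and_eq_true, and_true]
    norm_num
    rw [pvSlice04, pvSlice59, pvSlice1014, pvSlice1519]
    refine ⟨?_, ?_, ?_, ?_⟩
    · rw [List.take_left' l1]; exact d1
    · rw [d5, List.take_left' l2]; exact d2
    · rw [d10, List.take_left' l3]; exact d3
    · rw [d15, List.take_of_length_le (by omega)]; exact d4

theorem check_card_number_spec : Claim_equal_check_card_number := by
  intro number _
  unfold Spec_check_card_number check_card_number check_card_number_alt
  rw [pvSplitOn_eq, Bool.eq_iff_iff, pvLHS_iff, ← pvRHS_iff]
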